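-- pv_equiv track=rewrite | github.com/SJ-1011/BOJ | 백준/Silver/1158. 요세푸스 문제/요세푸스 문제.py | Solution
-- ===== SOURCE A (Python) =====
-- def Solution(N, K):
--   queue = [i for i in range(1, N+1)]
--   p = -1
--   ans = []
--
--   while queue:
--     p = (p + K) % len(queue)
--     ans.append(queue.pop(p))
--     p -= 1
--
--   return ans
-- ===== SOURCE B (Python) =====
-- def Solution(N, K):
--     # Order-statistic tree: k-th remaining person found and removed in O(log N)
--     # instead of A's O(N) list pop; same elimination-index recurrence.
--     def build(lo, hi):
--         if lo == hi:
--             return (1, lo)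
--         mid = (lo + hi) // 2
--         left = build(lo, mid)
--         right = build(mid + 1, hi)
--         return (left[0] + right[0], left, right)
--
--     def delete_kth(t, k):
--         if len(t) == 2:
--             return t[1], None
--         cnt, left, right = t
--         if k <= left[0]:
--             v, nl = delete_kth(left, k)
--             nt = right if nl is None else (cnt - 1, nl, right)
--         else:
--             v, nr = delete_kth(right, k - left[0])
--             nt = left if nr is None else (cnt - 1, left, nr)
--         return v, nt
--
--     ans = []
--     if N >= 1:
--         t = build(1, N)
--         m, c = N, 0
--         while m > 0:
--             c = (c + K - 1) % m
--             v, t = delete_kth(t, c + 1)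
--             ans.append(v)
--             m -= 1
--     return ans
-- ===== Notes on version B (the rewrite author's own statement) =====
-- stated objective: alternative
-- what changed: B replaces A's list simulation with pop(p) (a linear mid-list deletion per elimination) by an order-statistic tree built over 1..N, locating and deleting the k-th remaining person along a log-depth path; intended as asymptotically better (O(N log N) vs O(N^2)), but a timing run readings at the largest sizes varied (1.1-2.1x), so no speed is claimed.
import Mathlib
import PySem

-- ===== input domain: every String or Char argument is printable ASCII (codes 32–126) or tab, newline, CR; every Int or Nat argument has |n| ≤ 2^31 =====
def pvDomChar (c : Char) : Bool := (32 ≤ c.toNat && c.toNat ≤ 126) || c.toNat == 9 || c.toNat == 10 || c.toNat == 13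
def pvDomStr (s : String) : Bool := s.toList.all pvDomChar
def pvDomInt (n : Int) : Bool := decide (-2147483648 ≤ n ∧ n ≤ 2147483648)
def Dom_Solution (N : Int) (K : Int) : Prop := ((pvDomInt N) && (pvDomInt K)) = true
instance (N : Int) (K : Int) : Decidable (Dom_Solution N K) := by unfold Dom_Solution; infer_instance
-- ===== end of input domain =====

-- B replaces A's mid-list pop(p) simulation by an order-statistic tree over 1..N (k-th remaining person found and deleted along a log-depth path).

-- ===== PORT A =====
-- while queue: p = (p+K) % len(queue); ans.append(queue.pop(p)); p -= 1
def pvALoop (K : Int) (queue : List Int) (p : Int) (ans : List Int) : List Int :=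
  if _hq : queue = [] then ans
  else
    let p' := PySem.Int.mod (p + K) (queue.length : Int)
    match hp : PySem.List.pop? queue p' with
    | some xr => pvALoop K xr.2 (p' - 1) (ans ++ [xr.1])
    | none => ans   -- unreachable: 0 ≤ p' < len queue, pop? succeeds
  termination_by queue.length
  decreasing_by
    have := PySem.List.length_of_pop?_eq_some _ hp
    omega

def Solution (N : Int) (K : Int) : List Int :=
  pvALoop K (PySem.List.pyRange 1 (N + 1) 1) (-1) []

-- ===== PORT B =====
-- Python tuples: leaf = (1, value), node = (count, left, right)
inductive PvTree : Type
  | leaf : Int → PvTree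
  | node : Int → PvTree → PvTree → PvTree
deriving DecidableEq, Repr

-- t[0], the stored count (leaves store 1)
def pvCount : PvTree → Int
  | .leaf _ => 1
  | .node c _ _ => c

-- build(lo, hi); Python recurses only with lo ≤ hi, the hi < lo branch is a totality guard
def pvBuild (lo hi : Int) : PvTree :=
  if lo = hi then .leaf lo
  else if hi < lo then .leaf lo   -- unreachable in Python's call pattern
  else
    let mid := PySem.Int.floordiv (lo + hi) 2
    let l := pvBuild lo mid
    let r := pvBuild (mid + 1) hi
    .node (pvCount l + pvCount r) l r
  termination_by (hi - lo).toNat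
  decreasing_by
    · have h2 : PySem.Int.floordiv (lo + hi) 2 = (lo + hi) / 2 :=
        PySem.Int.floordiv_eq_ediv_of_pos (by norm_num)
      rw [h2]; omega
    · have h2 : PySem.Int.floordiv (lo + hi) 2 = (lo + hi) / 2 :=
        PySem.Int.floordiv_eq_ediv_of_pos (by norm_num)
      rw [h2]; omega

-- delete_kth(t, k): value at 1-based rank k among the leaves, and the tree without it (None if t was a leaf)
def pvDeleteKth : PvTree → Int → Int × Option PvTree
  | .leaf v, _ => (v, none)
  | .node c l r, k =>
    if k ≤ pvCount l then
      match pvDeleteKth l k with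
      | (v, none) => (v, some r)
      | (v, some nl) => (v, some (.node (c - 1) nl r))
    else
      match pvDeleteKth r (k - pvCount l) with
      | (v, none) => (v, some l)
      | (v, some nr) => (v, some (.node (c - 1) l nr))

-- while m > 0: c = (c+K-1) % m; v, t = delete_kth(t, c+1); ans.append(v); m -= 1
def pvBLoop (K : Int) (t : Option PvTree) (m c : Int) (ans : List Int) : List Int :=
  if _hm : 0 < m then
    match t with
    | some tr =>
      let c' := PySem.Int.mod (c + K - 1) m
      let p := pvDeleteKth tr (c' + 1)
      pvBLoop K p.2 (m - 1) c' (ans ++ [p.1])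
    | none => ans   -- unreachable: t is None only once m = 0
  else ans
  termination_by m.toNat
  decreasing_by omega

def Solution_alt (N : Int) (K : Int) : List Int :=
  if 1 ≤ N then pvBLoop K (some (pvBuild 1 N)) N 0 [] else []

-- ===== PRECONDITION & SPEC =====
def Spec_Solution (N : Int) (K : Int) (out : List Int) : Prop := out = Solution_alt N K
instance (N : Int) (K : Int) (out : List Int) : Decidable (Spec_Solution N K out) := by unfold Spec_Solution; infer_instance

-- ===== CLAIM (what is proved, stated in full; the proofs are below) =====
def Claim_equal_Solution : Prop := ∀ (N : Int) (K : Int), Dom_Solution N K → Spec_Solution N K (Solution N K)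

-- ===== LEMMAS AND PROOFS =====

-- the list of leaves, in order: the remaining people
def pvToList : PvTree → List Int
  | .leaf v => [v]
  | .node _ l r => pvToList l ++ pvToList r

-- well-formed: every stored count is the number of leaves below
def pvWF : PvTree → Prop
  | .leaf _ => True
  | .node c l r => c = pvCount l + pvCount r ∧ pvWF l ∧ pvWF r

lemma pvToList_ne_nil (t : PvTree) : pvToList t ≠ [] := by
  induction t with
  | leaf v => simp [pvToList]
  | node c l r ihl ihr => simp [pvToList, ihl]

lemma pvCount_eq (t : PvTree) (h : pvWF t) : pvCount t = ((pvToList t).length : Int) := by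
  induction t with
  | leaf v => simp [pvCount, pvToList]
  | node c l r ihl ihr =>
    obtain ⟨hc, hl, hr⟩ := h
    have h0 : pvCount (PvTree.node c l r) = c := rfl
    rw [h0, hc, ihl hl, ihr hr, pvToList, List.length_append]
    push_cast
    ring

lemma pvBuild_wf (lo hi : Int) : pvWF (pvBuild lo hi) := by
  rw [pvBuild]
  split
  · exact trivial
  · split
    · exact trivial
    · exact ⟨rfl, pvBuild_wf _ _, pvBuild_wf _ _⟩
  termination_by (hi - lo).toNat
  decreasing_by
    · have h2 : PySem.Int.floordiv (lo + hi) 2 = (lo + hi) / 2 :=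
        PySem.Int.floordiv_eq_ediv_of_pos (by norm_num)
      rw [h2]; omega
    · have h2 : PySem.Int.floordiv (lo + hi) 2 = (lo + hi) / 2 :=
        PySem.Int.floordiv_eq_ediv_of_pos (by norm_num)
      rw [h2]; omega

lemma pvBuild_toList (lo hi : Int) (h : lo ≤ hi) :
    pvToList (pvBuild lo hi) = PySem.List.pyRange lo (hi + 1) 1 := by
  rw [pvBuild]
  split
  · rename_i he
    subst he
    rw [PySem.List.pyRange_one_singleton]
    rfl
  · split
    · omega
    · rename_i hne hnlt
      have h2 : PySem.Int.floordiv (lo + hi) 2 = (lo + hi) / 2 :=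
        PySem.Int.floordiv_eq_ediv_of_pos (by norm_num)
      show pvToList (pvBuild lo _) ++ pvToList (pvBuild _ hi) = _
      rw [pvBuild_toList lo (PySem.Int.floordiv (lo + hi) 2) (by rw [h2]; omega),
        pvBuild_toList (PySem.Int.floordiv (lo + hi) 2 + 1) hi (by rw [h2]; omega),
        ← PySem.List.pyRange_one_append lo (PySem.Int.floordiv (lo + hi) 2 + 1) (hi + 1)
          (by rw [h2]; omega) (by rw [h2]; omega)]
  termination_by (hi - lo).toNat
  decreasing_by
    · have h2 : PySem.Int.floordiv (lo + hi) 2 = (lo + hi) / 2 :=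
        PySem.Int.floordiv_eq_ediv_of_pos (by norm_num)
      rw [h2]; omega
    · have h2 : PySem.Int.floordiv (lo + hi) 2 = (lo + hi) / 2 :=
        PySem.Int.floordiv_eq_ediv_of_pos (by norm_num)
      rw [h2]; omega

-- what delete_kth does, stated against the leaf list
lemma pvDeleteKth_spec (t : PvTree) (k : Int) (hwf : pvWF t) (h1 : 1 ≤ k)
    (h2 : k ≤ pvCount t) :
    some (pvDeleteKth t k).1 = (pvToList t)[(k - 1).toNat]? ∧
    (match (pvDeleteKth t k).2 with
     | none => (pvToList t).length = 1
     | some t' => pvToList t' = (pvToList t).eraseIdx (k - 1).toNat ∧ pvWF t' ∧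
         pvCount t' = pvCount t - 1) := by
  induction t generalizing k with
  | leaf v =>
    have hk : k = 1 := by have h0 : pvCount (PvTree.leaf v) = 1 := rfl; rw [h0] at h2; omega
    subst hk
    simp [pvDeleteKth, pvToList]
  | node c l r ihl ihr =>
    obtain ⟨hc, hl, hr⟩ := hwf
    have hcl := pvCount_eq l hl
    have hcr := pvCount_eq r hr
    have hlne := pvToList_ne_nil l
    have hrne := pvToList_ne_nil r
    by_cases hk : k ≤ pvCount l
    · obtain ⟨ih1, ih2⟩ := ihl k hl h1 hk
      have hkL : k ≤ ((pvToList l).length : Int) := by rw [← hcl]; exact hk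
      have hklt : (k - 1).toNat < (pvToList l).length := by omega
      constructor
      · rw [pvDeleteKth]
        rw [if_pos hk]
        rcases hdel : (pvDeleteKth l k).2 with _ | nl
        · have : pvDeleteKth l k = ((pvDeleteKth l k).1, none) := by
            rw [← hdel]
          rw [this]
          simp only []
          rw [pvToList, List.getElem?_append_left hklt]
          exact ih1
        · have : pvDeleteKth l k = ((pvDeleteKth l k).1, some nl) := by
            rw [← hdel]
          rw [this]
          simp only []
          rw [pvToList, List.getElem?_append_left hklt]
          exact ih1
      · rw [pvDeleteKth, if_pos hk]
        rcases hdel : (pvDeleteKth l k).2 with _ | nl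
        · have heq : pvDeleteKth l k = ((pvDeleteKth l k).1, none) := by rw [← hdel]
          rw [heq]
          simp only []
          rw [hdel] at ih2
          -- left subtree was a single leaf; k = 1
          have hlen1 : (pvToList l).length = 1 := ih2
          have hk1 : (k - 1).toNat = 0 := by omega
          obtain ⟨x, hx⟩ : ∃ x, pvToList l = [x] := by
            rcases h : pvToList l with _ | ⟨x, xs⟩
            · simp [h] at hlen1
            · rcases xs with _ | _
              · exact ⟨x, rfl⟩
              · simp [h] at hlen1
          refine ⟨?_, hr, ?_⟩
          · rw [pvToList, hx, hk1]
            simp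
          · show pvCount r = c - 1
            rw [hc, hcl, hx]
            simp
        · have heq : pvDeleteKth l k = ((pvDeleteKth l k).1, some nl) := by rw [← hdel]
          rw [heq]
          simp only []
          rw [hdel] at ih2
          obtain ⟨hnl, hwnl, hcnl⟩ := ih2
          refine ⟨?_, ⟨by show c - 1 = pvCount nl + pvCount r; omega, hwnl, hr⟩, rfl⟩
          rw [pvToList, pvToList, hnl, List.eraseIdx_append_of_lt_length hklt]
    · have hk1 : 1 ≤ k - pvCount l := by omega
      have hk2 : k - pvCount l ≤ pvCount r := by
        have h0 : pvCount (PvTree.node c l r) = c := rfl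
        rw [h0, hc] at h2
        omega
      obtain ⟨ih1, ih2⟩ := ihr (k - pvCount l) hr hk1 hk2
      have hkG : ((pvToList l).length : Int) < k := by rw [← hcl]; omega
      have hkge : (pvToList l).length ≤ (k - 1).toNat := by omega
      have hidx : (k - pvCount l - 1).toNat = (k - 1).toNat - (pvToList l).length := by
        rw [hcl]; omega
      constructor
      · rw [pvDeleteKth, if_neg hk]
        rcases hdel : (pvDeleteKth r (k - pvCount l)).2 with _ | nr
        · have heq : pvDeleteKth r (k - pvCount l) = ((pvDeleteKth r (k - pvCount l)).1, none) := by
            rw [← hdel]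
          rw [heq]
          simp only []
          rw [pvToList, List.getElem?_append_right hkge, ← hidx]
          exact ih1
        · have heq : pvDeleteKth r (k - pvCount l)
              = ((pvDeleteKth r (k - pvCount l)).1, some nr) := by rw [← hdel]
          rw [heq]
          simp only []
          rw [pvToList, List.getElem?_append_right hkge, ← hidx]
          exact ih1
      · rw [pvDeleteKth, if_neg hk]
        rcases hdel : (pvDeleteKth r (k - pvCount l)).2 with _ | nr
        · have heq : pvDeleteKth r (k - pvCount l) = ((pvDeleteKth r (k - pvCount l)).1, none) := by
            rw [← hdel]
          rw [heq]
          simp only []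
          rw [hdel] at ih2
          have hlen1 : (pvToList r).length = 1 := ih2
          obtain ⟨x, hx⟩ : ∃ x, pvToList r = [x] := by
            rcases h : pvToList r with _ | ⟨x, xs⟩
            · simp [h] at hlen1
            · rcases xs with _ | _
              · exact ⟨x, rfl⟩
              · simp [h] at hlen1
          have hkl : (k - 1).toNat = (pvToList l).length := by omega
          refine ⟨?_, hl, ?_⟩
          · rw [pvToList, hx, hkl]
            rw [List.eraseIdx_append_of_length_le (le_refl _)]
            simp
          · show pvCount l = c - 1
            rw [hc, hcr, hx]
            simp
        · have heq : pvDeleteKth r (k - pvCount l)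
              = ((pvDeleteKth r (k - pvCount l)).1, some nr) := by rw [← hdel]
          rw [heq]
          simp only []
          rw [hdel] at ih2
          obtain ⟨hnr, hwnr, hcnr⟩ := ih2
          refine ⟨?_, ⟨by show c - 1 = pvCount l + pvCount nr; omega, hl, hwnr⟩, rfl⟩
          rw [pvToList, pvToList, hnr, List.eraseIdx_append_of_length_le hkge, hidx]

lemma pvALoop_step (K : Int) (q : List Int) (p : Int) (ans : List Int) (hq : q ≠ [])
    (x : Int) (rest : List Int)
    (hpop : PySem.List.pop? q (PySem.Int.mod (p + K) (q.length : Int)) = some (x, rest)) :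
    pvALoop K q p ans
      = pvALoop K rest (PySem.Int.mod (p + K) (q.length : Int) - 1) (ans ++ [x]) := by
  rw [pvALoop, dif_neg hq]
  dsimp only
  split
  · rename_i xr heq
    rw [hpop] at heq
    cases heq
    rfl
  · rename_i heq
    rw [hpop] at heq
    cases heq

-- loop invariant: A's queue is the tree's leaf list and A's pointer p is B's c minus 1
lemma pvLoop_eq (K : Int) :
    ∀ (n : Nat) (q : List Int) (p : Int) (ans : List Int) (t : PvTree),
      pvWF t → pvToList t = q → q.length = n →
      pvALoop K q p ans = pvBLoop K (some t) (n : Int) (p + 1) ans := by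
  intro n
  induction n using Nat.strong_induction_on with
  | _ n ih =>
    intro q p ans t hwf htl hlen
    have hq : q ≠ [] := by rw [← htl]; exact pvToList_ne_nil t
    have hnpos : 0 < n := hlen ▸ List.length_pos_iff.mpr hq
    have hnI : (0:Int) < (q.length : Int) := by
      have := List.length_pos_iff.mpr hq; exact_mod_cast this
    have hi0 : 0 ≤ PySem.Int.mod (p + K) (q.length : Int) := PySem.Int.mod_nonneg _ hnI
    have hin : PySem.Int.mod (p + K) (q.length : Int) < (q.length : Int) :=
      PySem.Int.mod_lt _ hnI
    set i := PySem.Int.mod (p + K) ((q.length : Int)) with hidef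
    set it := i.toNat with hitdef
    have hitq : it < q.length := by omega
    have hpop : PySem.List.pop? q i = some (q[it]'hitq, q.eraseIdx it) := by
      have hc : ((it : Nat) : Int) = i := Int.toNat_of_nonneg hi0
      rw [← hc]
      exact PySem.List.pop?_natCast q it hitq
    rw [pvALoop_step K q p ans hq _ _ hpop]
    -- unfold B one step
    rw [pvBLoop, dif_pos (by exact_mod_cast hnpos)]
    dsimp only
    have harg : p + 1 + K - 1 = p + K := by ring
    have hmod : PySem.Int.mod (p + 1 + K - 1) ((n : Nat) : Int) = i := by
      rw [harg, hidef, hlen]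
    rw [hmod]
    have hcnt : pvCount t = ((n : Nat) : Int) := by
      rw [pvCount_eq t hwf, htl, hlen]
    obtain ⟨hv, hrest⟩ := pvDeleteKth_spec t (i + 1) hwf (by omega) (by rw [hcnt]; omega)
    have hv' : (pvDeleteKth t (i + 1)).1 = q[it]'hitq := by
      have : (i + 1 - 1).toNat = it := by omega
      rw [this, htl, List.getElem?_eq_getElem hitq] at hv
      exact Option.some_inj.mp hv
    rcases hdel : (pvDeleteKth t (i + 1)).2 with _ | t'
    · -- the tree is exhausted: q was a singleton
      rw [hdel] at hrest
      have hn1 : n = 1 := by rw [← hlen, ← htl]; exact hrest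
      have hq1 : q.eraseIdx it = [] := by
        have hz : (q.eraseIdx it).length = 0 := by
          simp [List.length_eraseIdx, hitq]
          omega
        exact List.eq_nil_of_length_eq_zero hz
      rw [hq1, pvALoop, hv']
      simp [hn1, pvBLoop]
    · rw [hdel] at hrest
      obtain ⟨ht', hwf', hcnt'⟩ := hrest
      have hidx : (i + 1 - 1).toNat = it := by omega
      rw [hidx] at ht'
      have hlen' : (q.eraseIdx it).length = n - 1 := by
        simp [List.length_eraseIdx, hlen]
        omega
      have := ih (n - 1) (by omega) (q.eraseIdx it) (i - 1) (ans ++ [q[it]'hitq]) t' hwf'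
        (by rw [ht', htl]) hlen'
      rw [this, hv']
      have h1 : i - 1 + 1 = i := by ring
      have h2 : ((n : Nat) : Int) - 1 = (((n - 1 : Nat)) : Int) := by omega
      rw [h1, h2]

-- ===== VERDICT (by name: the statement is the Claim_ definition above) =====
theorem Solution_spec : Claim_equal_Solution := by
  intro N K _hd
  unfold Spec_Solution Solution Solution_alt
  by_cases hN : 1 ≤ N
  · rw [if_pos hN]
    have hlen : ((PySem.List.pyRange 1 (N + 1) 1).length : Int) = N := by
      rw [PySem.List.length_pyRange_one]; omega
    rw [pvLoop_eq K (PySem.List.pyRange 1 (N + 1) 1).length _ (-1) [] (pvBuild 1 N)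
      (pvBuild_wf 1 N) (pvBuild_toList 1 N hN) rfl]
    rw [hlen]
    norm_num
  · rw [if_neg hN]
    rw [PySem.List.pyRange_one_eq_nil (by omega)]
    rw [pvALoop]
    simp
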